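-- pv_equiv track=rewrite | github.com/delyan-kirov/Geometric-Lattice | SGS/gap.py | bij
-- ===== SOURCE A (Python) =====
-- def bij(cycle, n, bijection):
--     identity = list(range(1,n+1))
--
--     for i in range(0,len(identity)):
--         for j in range(0, len(cycle)):
--             if identity[i] == cycle[j]:
--                 if j == len(cycle) - 1:
--                     bijection[i] = cycle[0]
--                     break
--                 bijection[i] = cycle[j+1]
--                 break
--     return(bijection)
-- ===== SOURCE B (Python) =====
-- def bij(cycle, n, bijection):
--     # Scatter pass: walk the cycle once (in reverse so the first occurrence of a
--     # duplicated value wins), writing each value's successor at its slot.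
--     m = len(cycle)
--     for j in range(m - 1, -1, -1):
--         v = cycle[j]
--         if 1 <= v <= n:
--             bijection[v - 1] = cycle[0] if j == m - 1 else cycle[j + 1]
--     return bijection
-- ===== Notes on version B (the rewrite author's own statement) =====
-- stated objective: faster
-- what changed: A gathers: for each identity position 1..n it scans the whole cycle for a match (O(n*m)); B makes one reverse scatter pass over the cycle, writing each in-range value's successor directly at its slot (O(m) writes), never building the identity list.
import Mathlib
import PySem

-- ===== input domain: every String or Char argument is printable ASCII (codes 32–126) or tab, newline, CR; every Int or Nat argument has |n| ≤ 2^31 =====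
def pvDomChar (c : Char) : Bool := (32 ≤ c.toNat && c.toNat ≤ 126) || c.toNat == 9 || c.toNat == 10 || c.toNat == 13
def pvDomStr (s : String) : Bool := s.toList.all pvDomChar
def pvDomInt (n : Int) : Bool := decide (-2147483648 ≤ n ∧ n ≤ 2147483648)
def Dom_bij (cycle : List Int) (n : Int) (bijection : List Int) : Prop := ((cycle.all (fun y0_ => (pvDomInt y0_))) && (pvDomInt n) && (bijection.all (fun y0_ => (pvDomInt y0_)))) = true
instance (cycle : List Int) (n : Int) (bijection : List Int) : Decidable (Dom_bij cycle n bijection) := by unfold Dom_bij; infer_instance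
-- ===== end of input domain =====

-- B replaces A's O(n·m) gather (scan the whole cycle for every identity slot) by a single
-- reverse scatter pass over the cycle (objective: faster, O(n·m) → O(m) plus output size).
-- Both A and B mutate `bijection` in place in Python; the equivalence proved is about the return value.

-- ===== PORT A =====
def bijInner (cycle : List Int) (x : Int) (bj : List Int) (i : Int) : List Int → List Int
  | [] => bj
  | j :: rest =>
    if x = PySem.List.pyGetD cycle j 0 then
      if j = (cycle.length : Int) - 1 then
        PySem.List.pySetD bj i (PySem.List.pyGetD cycle 0 0)
      else
        PySem.List.pySetD bj i (PySem.List.pyGetD cycle (j + 1) 0)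
    else bijInner cycle x bj i rest

def bij (cycle : List Int) (n : Int) (bijection : List Int) : List Int :=
  let identity := PySem.List.pyRange 1 (n + 1) 1
  (PySem.List.pyRange 0 (identity.length : Int) 1).foldl
    (fun bj i =>
      bijInner cycle (PySem.List.pyGetD identity i 0) bj i
        (PySem.List.pyRange 0 (cycle.length : Int) 1))
    bijection

-- ===== PORT B =====
def bij_alt (cycle : List Int) (n : Int) (bijection : List Int) : List Int :=
  let m : Int := (cycle.length : Int)
  (PySem.List.pyRange (m - 1) (-1) (-1)).foldl
    (fun bj j =>
      let v := PySem.List.pyGetD cycle j 0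
      if 1 ≤ v ∧ v ≤ n then
        PySem.List.pySetD bj (v - 1)
          (if j = m - 1 then PySem.List.pyGetD cycle 0 0 else PySem.List.pyGetD cycle (j + 1) 0)
      else bj)
    bijection

-- ===== PRECONDITION & SPEC =====
-- Pre_ excludes exactly the inputs on which Python A raises IndexError: some cycle value v with
-- 1 ≤ v ≤ n would be matched at identity position v-1 but bijection is shorter than v.
def Pre_bij (cycle : List Int) (n : Int) (bijection : List Int) : Prop :=
  ∀ v ∈ cycle, 1 ≤ v → v ≤ n → v ≤ (bijection.length : Int)
instance (cycle : List Int) (n : Int) (bijection : List Int) : Decidable (Pre_bij cycle n bijection) := by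
  unfold Pre_bij; infer_instance

def pvWitness_bij : List Int × Int × List Int := ([1, 2, 3], 3, [0, 0, 0])

def Spec_bij (cycle : List Int) (n : Int) (bijection : List Int) (out : List Int) : Prop := out = bij_alt cycle n bijection
instance (cycle : List Int) (n : Int) (bijection : List Int) (out : List Int) : Decidable (Spec_bij cycle n bijection out) := by unfold Spec_bij; infer_instance

-- ===== CLAIM (what is proved, stated in full; the proofs are below) =====
def Claim_equal_bij : Prop := ∀ (cycle : List Int) (n : Int) (bijection : List Int), Dom_bij cycle n bijection → Pre_bij cycle n bijection → Spec_bij cycle n bijection (bij cycle n bijection)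

-- ===== LEMMAS AND PROOFS =====

-- successor value of the cycle entry at index j (what both programs write)
def succV (cycle : List Int) (j : Nat) : Int :=
  if (j : Int) = (cycle.length : Int) - 1 then cycle.getD 0 0 else cycle.getD (j + 1) 0

-- first index of x in cycle
def nextIdx (cycle : List Int) (x : Int) : Option Nat :=
  cycle.findIdx? (fun c => decide (x = c))

-- A's single outer-loop step, after simplification
def stepA (cycle : List Int) (bj : List Int) (i : Nat) : List Int :=
  match nextIdx cycle ((i : Int) + 1) with
  | none => bj
  | some j => bj.set i (succV cycle j)

-- B's loop body as a named function
def stepB (cycle : List Int) (n : Int) (bj : List Int) (j : Int) : List Int :=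
  if 1 ≤ PySem.List.pyGetD cycle j 0 ∧ PySem.List.pyGetD cycle j 0 ≤ n then
    PySem.List.pySetD bj (PySem.List.pyGetD cycle j 0 - 1)
      (if j = (cycle.length : Int) - 1 then PySem.List.pyGetD cycle 0 0
       else PySem.List.pyGetD cycle (j + 1) 0)
  else bj

-- the value written for a match at index t equals succV
theorem writeVal_eq (cycle : List Int) (t : Nat) :
    (if (t : Int) = (cycle.length : Int) - 1 then PySem.List.pyGetD cycle 0 0
     else PySem.List.pyGetD cycle ((t : Int) + 1) 0) = succV cycle t := by
  unfold succV
  by_cases h : (t : Int) = (cycle.length : Int) - 1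
  · rw [if_pos h, if_pos h, PySem.List.pyGetD_zero]
  · rw [if_neg h, if_neg h, show ((t : Int) + 1) = ((t + 1 : Nat) : Int) by push_cast; ring,
        PySem.List.pyGetD_natCast]

-- A's inner loop = look up the first matching index, then one write
theorem bijInner_eq (cycle : List Int) (x : Int) (i : Int) :
    ∀ (js : List Int) (bj : List Int),
      bijInner cycle x bj i js =
        match js.find? (fun j => decide (x = PySem.List.pyGetD cycle j 0)) with
        | none => bj
        | some j =>
            if j = (cycle.length : Int) - 1 then PySem.List.pySetD bj i (PySem.List.pyGetD cycle 0 0)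
            else PySem.List.pySetD bj i (PySem.List.pyGetD cycle (j + 1) 0) := by
  intro js
  induction js with
  | nil => intro bj; simp [bijInner]
  | cons j rest ih =>
    intro bj
    by_cases h : x = PySem.List.pyGetD cycle j 0
    · simp [bijInner, h, List.find?]
    · simp [bijInner, h, List.find?, ih]

-- first matching index over range = findIdx?
theorem find_range_eq (cycle : List Int) (x : Int) :
    (List.range cycle.length).find? (fun j => decide (x = cycle.getD j 0)) = nextIdx cycle x := by
  unfold nextIdx
  induction cycle with
  | nil => simp
  | cons c cs ih =>
    simp only [List.length_cons, List.range_succ_eq_map, List.find?, List.findIdx?_cons]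
    by_cases h : x = c
    · simp [h]
    · simp only [List.getD_cons_zero, h, decide_false, List.find?_map]
      rw [show (fun j => decide (x = (c :: cs).getD j 0)) ∘ Nat.succ
            = fun j => decide (x = cs.getD j 0) from rfl]
      rw [← ih]
      simp

theorem foldA_length (cycle : List Int) :
    ∀ (l : List Nat) (b : List Int), (l.foldl (stepA cycle) b).length = b.length := by
  intro l
  induction l with
  | nil => intro b; rfl
  | cons i rest ih =>
    intro b
    simp only [List.foldl_cons, ih]
    unfold stepA
    cases nextIdx cycle ((i : Int) + 1) <;> simp

-- A reduced to a fold of stepA over List.range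
theorem bij_eq (cycle : List Int) (n : Int) (bijection : List Int) :
    bij cycle n bijection = (List.range n.toNat).foldl (stepA cycle) bijection := by
  simp only [bij]
  have hlen : (PySem.List.pyRange 1 (n + 1) 1).length = n.toNat := by
    rw [PySem.List.length_pyRange_one]; omega
  rw [hlen, PySem.List.pyRange_zero_natCast n.toNat, List.foldl_map]
  apply PySem.List.foldl_congr_mem
  intro bj i hi
  have hi' : i < (PySem.List.pyRange 1 (n + 1) 1).length := by
    rw [hlen]; exact List.mem_range.mp hi
  have hx : PySem.List.pyGetD (PySem.List.pyRange 1 (n + 1) 1) (i : Int) 0 = (i : Int) + 1 := by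
    rw [PySem.List.pyGetD_natCast, List.getD_eq_getElem _ _ hi',
        PySem.List.getElem_pyRange_one]
    ring
  rw [bijInner_eq, hx]
  rw [PySem.List.pyRange_zero_natCast, List.find?_map]
  rw [show ((fun j => decide ((i : Int) + 1 = PySem.List.pyGetD cycle j 0)) ∘ fun (k : Nat) => (k : Int))
        = fun (k : Nat) => decide ((i : Int) + 1 = cycle.getD k 0) by
      funext k; simp]
  rw [find_range_eq]
  unfold stepA
  cases hj : nextIdx cycle ((i : Int) + 1) with
  | none => rfl
  | some j =>
    simp only [Option.map_some]
    rw [← writeVal_eq]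
    by_cases hlast : (j : Int) = (cycle.length : Int) - 1
    · simp [hlast, PySem.List.pySetD_natCast]
    · simp [hlast, PySem.List.pySetD_natCast]

theorem stepA_get_ne (cycle : List Int) (b : List Int) (i k : Nat) (h : i ≠ k) :
    (stepA cycle b i)[k]? = b[k]? := by
  unfold stepA
  cases nextIdx cycle ((i : Int) + 1) with
  | none => rfl
  | some j => exact List.getElem?_set_ne h

theorem stepA_get_self (cycle : List Int) (b : List Int) (i : Nat) :
    (stepA cycle b i)[i]? =
      match nextIdx cycle ((i : Int) + 1) with
      | none => b[i]?
      | some j => (b.set i (succV cycle j))[i]? := by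
  unfold stepA
  cases nextIdx cycle ((i : Int) + 1) <;> rfl

-- pointwise characterisation of A's fold
theorem A_get (cycle : List Int) :
    ∀ (N : Nat) (b : List Int) (k : Nat),
      ((List.range N).foldl (stepA cycle) b)[k]? =
        if k < N then
          match nextIdx cycle ((k : Int) + 1) with
          | none => b[k]?
          | some j => (b.set k (succV cycle j))[k]?
        else b[k]? := by
  intro N
  induction N with
  | zero => intro b k; simp
  | succ N ih =>
    intro b k
    rw [List.range_succ, List.foldl_append, List.foldl_cons, List.foldl_nil]
    by_cases hk : k = N
    · subst hk
      rw [stepA_get_self]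
      have hXlen : ((List.range k).foldl (stepA cycle) b).length = b.length :=
        foldA_length cycle (List.range k) b
      have hXk : ((List.range k).foldl (stepA cycle) b)[k]? = b[k]? := by rw [ih]; simp
      cases hj : nextIdx cycle ((k : Int) + 1) with
      | none => dsimp only; rw [hXk]; simp
      | some j =>
        dsimp only
        rw [if_pos (Nat.lt_succ_self k)]
        by_cases hkl : k < b.length
        · rw [List.getElem?_set_self (by omega), List.getElem?_set_self hkl]
        · rw [List.getElem?_eq_none (by simp only [List.length_set]; omega),
              List.getElem?_eq_none (by simp only [List.length_set]; omega)]
    · rw [stepA_get_ne cycle _ N k (fun h => hk h.symm), ih]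
      by_cases h2 : k < N
      · rw [if_pos h2, if_pos (by omega)]
      · rw [if_neg h2, if_neg (by omega)]

theorem stepB_length (cycle : List Int) (n : Int) (b : List Int) (j : Int) :
    (stepB cycle n b j).length = b.length := by
  unfold stepB
  by_cases h : 1 ≤ PySem.List.pyGetD cycle j 0 ∧ PySem.List.pyGetD cycle j 0 ≤ n
  · rw [if_pos h]; exact PySem.List.length_pySetD ..
  · rw [if_neg h]

-- what one scatter step does at position k
theorem stepB_get (cycle : List Int) (n : Int) (b : List Int) (t : Nat) (_ht : t < cycle.length)
    (k : Nat) :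
    (stepB cycle n b (t : Int))[k]? =
      if cycle.getD t 0 = (k : Int) + 1 ∧ (k : Int) + 1 ≤ n then (b.set k (succV cycle t))[k]?
      else b[k]? := by
  unfold stepB
  rw [writeVal_eq,
      show PySem.List.pyGetD cycle (t : Int) 0 = cycle.getD t 0 from PySem.List.pyGetD_natCast ..]
  by_cases hvk : cycle.getD t 0 = (k : Int) + 1
  · by_cases hg : (k : Int) + 1 ≤ n
    · have hc : 1 ≤ cycle.getD t 0 ∧ cycle.getD t 0 ≤ n := ⟨by omega, by omega⟩
      have hrhs : cycle.getD t 0 = (k : Int) + 1 ∧ (k : Int) + 1 ≤ n := ⟨hvk, hg⟩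
      have hidx : (cycle.getD t 0 - 1).toNat = k := by omega
      rw [if_pos hc, PySem.List.pySetD_of_nonneg _ _ (by omega), hidx, if_pos hrhs]
    · have hnc : ¬(1 ≤ cycle.getD t 0 ∧ cycle.getD t 0 ≤ n) := by omega
      have hnrhs : ¬(cycle.getD t 0 = (k : Int) + 1 ∧ (k : Int) + 1 ≤ n) := by omega
      rw [if_neg hnc, if_neg hnrhs]
  · by_cases hv : 1 ≤ cycle.getD t 0 ∧ cycle.getD t 0 ≤ n
    · rw [if_pos hv, PySem.List.pySetD_of_nonneg _ _ (by omega),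
          List.getElem?_set_ne (by omega), if_neg (fun hc => hvk hc.1)]
    · rw [if_neg hv, if_neg (fun hc => hvk hc.1)]

-- pointwise characterisation of B's fold (iterating indices t-1 down to 0)
theorem B_get (cycle : List Int) (n : Int) :
    ∀ (t : Nat), t ≤ cycle.length → ∀ (b : List Int) (k : Nat),
      ((PySem.List.pyRange ((t : Int) - 1) (-1) (-1)).foldl (stepB cycle n) b)[k]? =
        match (List.range t).find? (fun j => decide ((k : Int) + 1 = cycle.getD j 0)) with
        | none => b[k]?
        | some j =>
            if (k : Int) + 1 ≤ n then (b.set k (succV cycle j))[k]? else b[k]? := by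
  intro t
  induction t with
  | zero => intro _ b k; rw [PySem.List.pyRange_neg_one_eq_nil (by norm_num)]; simp
  | succ t ih =>
    intro ht b k
    have hcast : ((t + 1 : Nat) : Int) - 1 = (t : Int) := by push_cast; ring
    rw [hcast, PySem.List.pyRange_neg_one_cons (by omega), List.foldl_cons]
    rw [ih (by omega)]
    have hblen : (stepB cycle n b (t : Int)).length = b.length := stepB_length ..
    rw [List.range_succ, List.find?_append]
    cases hf : (List.range t).find? (fun j => decide ((k : Int) + 1 = cycle.getD j 0)) with
    | some j =>
      simp only [Option.some_or]
      by_cases hg : (k : Int) + 1 ≤ n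
      · rw [if_pos hg, if_pos hg]
        by_cases hkl : k < b.length
        · rw [List.getElem?_set_self (by omega), List.getElem?_set_self hkl]
        · rw [List.getElem?_eq_none (by simp only [List.length_set]; omega),
              List.getElem?_eq_none (by simp only [List.length_set]; omega)]
      · rw [if_neg hg, if_neg hg, stepB_get cycle n b t (by omega) k,
            if_neg (fun hc => hg hc.2)]
    | none =>
      simp only [Option.none_or]
      rw [stepB_get cycle n b t (by omega) k]
      by_cases hp : (k : Int) + 1 = cycle.getD t 0
      · have hfind : List.find? (fun j => decide ((k : Int) + 1 = cycle.getD j 0)) [t] = some t := by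
          simp [hp]
        simp only [hfind]
        by_cases hg : (k : Int) + 1 ≤ n
        · have h1 : cycle.getD t 0 = (k : Int) + 1 ∧ (k : Int) + 1 ≤ n := ⟨hp.symm, hg⟩
          rw [if_pos h1, if_pos hg]
        · have h1 : ¬(cycle.getD t 0 = (k : Int) + 1 ∧ (k : Int) + 1 ≤ n) := fun hc => hg hc.2
          rw [if_neg h1, if_neg hg]
      · have hp' : ¬(k : Int) + 1 = cycle[t]?.getD 0 := by simpa [List.getD] using hp
        have hfind : List.find? (fun j => decide ((k : Int) + 1 = cycle.getD j 0)) [t] = none := by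
          simp [hp']
        simp only [hfind]
        rw [if_neg (fun hc => hp hc.1.symm)]

-- B as a fold of stepB (definitional)
theorem bij_alt_eq (cycle : List Int) (n : Int) (bijection : List Int) :
    bij_alt cycle n bijection =
      (PySem.List.pyRange ((cycle.length : Int) - 1) (-1) (-1)).foldl (stepB cycle n) bijection := rfl

-- ===== VERDICT (by name: the statement is the Claim_ definition above) =====
theorem bij_spec : Claim_equal_bij := by
  intro cycle n bijection _ _
  unfold Spec_bij
  show bij cycle n bijection = bij_alt cycle n bijection
  apply List.ext_getElem?
  intro k
  rw [bij_eq, A_get, bij_alt_eq, B_get cycle n cycle.length le_rfl, find_range_eq]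
  cases hj : nextIdx cycle ((k : Int) + 1) with
  | none => simp
  | some j =>
    dsimp only
    have hiff : k < n.toNat ↔ (k : Int) + 1 ≤ n := by omega
    by_cases h : k < n.toNat
    · rw [if_pos h, if_pos (hiff.mp h)]
    · rw [if_neg h, if_neg (fun hc => h (hiff.mpr hc))]
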